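-- pv_equiv track=rewrite | github.com/lorimer1/advent_of_code | 2015/05 Doesnt He Have Intern-Elves For This/aoc_201505.py | is_nice_string
-- ===== SOURCE A (Python) =====
-- def is_nice_string(s):
--     # Rule 1: Contains at least three vowels
--     if not sum(c in "aeiou" for c in s) >= 3:
--         return False
--
--     # Rule 2: Contains at least one letter that appears twice in a row
--     if not any(a == b for a, b in zip(s, s[1:])):
--         return False
--
--     # Rule 3: Does not contain the forbidden substrings
--     if not all(f not in s for f in ("ab", "cd", "pq", "xy")):
--         return False
--
--     return True
-- ===== SOURCE B (Python) =====
-- def is_nice_string(s):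
--     # Single pass: fuse A's three separate scans into one loop over the string.
--     vowels = 0
--     has_double = False
--     has_forbidden = False
--     for i, c in enumerate(s):
--         if c in "aeiou":
--             vowels += 1
--         if i > 0 and c == s[i - 1]:
--             has_double = True
--         if s[i:i + 2] in ("ab", "cd", "pq", "xy"):
--             has_forbidden = True
--     return vowels >= 3 and has_double and not has_forbidden
-- ===== Notes on version B (the rewrite author's own statement) =====
-- stated objective: alternative
-- what changed: A makes three separate passes (a vowel-count sum, a zip scan for doubles, and four substring searches); B fuses everything into a single indexed loop maintaining a vowel counter, a double flag and a forbidden-window flag.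
import Mathlib
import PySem

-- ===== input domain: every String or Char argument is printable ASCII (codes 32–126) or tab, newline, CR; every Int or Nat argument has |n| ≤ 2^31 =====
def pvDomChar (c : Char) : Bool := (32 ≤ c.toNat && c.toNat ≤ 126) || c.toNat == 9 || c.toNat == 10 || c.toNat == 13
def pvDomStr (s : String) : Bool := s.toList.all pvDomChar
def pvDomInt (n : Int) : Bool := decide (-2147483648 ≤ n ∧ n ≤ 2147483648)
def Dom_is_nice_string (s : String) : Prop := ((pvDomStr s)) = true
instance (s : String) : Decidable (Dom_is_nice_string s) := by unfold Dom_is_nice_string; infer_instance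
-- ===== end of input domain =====

-- B fuses A's three separate scans into one pass over the string; same result, no speed claim.

-- ===== PORT A =====
-- Rule 1's generator sums booleans as ints; rule 2 zips s with s[1:]; rule 3 tests four substrings.
def is_nice_string (s : String) : Bool :=
  if !(decide (3 ≤ (s.toList.map (fun c => if ("aeiou".toList.contains c) then (1 : Int) else 0)).sum)) then
    false
  else if !((s.toList.zip (PySem.List.slice s.toList (some 1) none)).any (fun p => p.1 == p.2)) then
    false
  else if !([("ab" : String), "cd", "pq", "xy"].all (fun f => !PySem.Str.isIn f s)) then
    false
  else
    true

-- ===== PORT B =====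
-- One pass: prev carries s[i-1], the head of rest is s[i+1] (the two-char window s[i:i+2]).
def pvForbiddenPair (a b : Char) : Bool :=
  (a == 'a' && b == 'b') || (a == 'c' && b == 'd') || (a == 'p' && b == 'q') || (a == 'x' && b == 'y')

def pvAltLoop : Option Char → List Char → Nat → Bool → Bool → Bool
  | _, [], vowels, hasDouble, hasForbidden => decide (3 ≤ vowels) && hasDouble && !hasForbidden
  | prev, c :: rest, vowels, hasDouble, hasForbidden =>
      pvAltLoop (some c) rest
        (if "aeiou".toList.contains c then vowels + 1 else vowels)
        (hasDouble || (prev == some c))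
        (hasForbidden || (match rest with
                          | c2 :: _ => pvForbiddenPair c c2
                          | [] => false))

def is_nice_string_alt (s : String) : Bool :=
  pvAltLoop none s.toList 0 false false

-- ===== PRECONDITION & SPEC =====
def Spec_is_nice_string (s : String) (out : Bool) : Prop := out = is_nice_string_alt s
instance (s : String) (out : Bool) : Decidable (Spec_is_nice_string s out) := by unfold Spec_is_nice_string; infer_instance

-- ===== CLAIM (what is proved, stated in full; the proofs are below) =====
def Claim_equal_is_nice_string : Prop := ∀ (s : String), Dom_is_nice_string s → Spec_is_nice_string s (is_nice_string s)

-- ===== LEMMAS AND PROOFS =====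

-- closed descriptions of the three facts B's loop accumulates
def pvDbl : Option Char → List Char → Bool
  | _, [] => false
  | prev, c :: rest => (prev == some c) || pvDbl (some c) rest

def pvForb : List Char → Bool
  | [] => false
  | [_] => false
  | a :: b :: rest => pvForbiddenPair a b || pvForb (b :: rest)

def pvAdj (x y : Char) : List Char → Bool
  | [] => false
  | [_] => false
  | a :: b :: rest => (a == x && b == y) || pvAdj x y (b :: rest)

theorem pvAltLoop_spec (l : List Char) :
    ∀ (prev : Option Char) (v : Nat) (d f : Bool),
      pvAltLoop prev l v d f
        = (decide (3 ≤ v + l.countP (fun c => "aeiou".toList.contains c))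
            && (d || pvDbl prev l) && !(f || pvForb l)) := by
  induction l with
  | nil => intro prev v d f; simp [pvAltLoop, pvDbl, pvForb]
  | cons c rest ih =>
      intro prev v d f
      simp only [pvAltLoop]
      rw [ih]
      cases rest with
      | nil =>
          simp only [pvDbl, pvForb, List.countP_cons, List.countP_nil, Nat.zero_add,
            Bool.or_false]
          split_ifs <;> simp
      | cons c2 rest2 =>
          conv_rhs => rw [List.countP_cons]
          simp only [pvDbl, pvForb, Bool.or_assoc]
          by_cases hb : ("aeiou".toList.contains c) = true
          · rw [if_pos hb, if_pos hb,
              show ∀ k : Nat, (v + 1) + k = v + (k + 1) from fun k => by omega]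
          · rw [if_neg hb, if_neg hb,
              show ∀ k : Nat, v + (k + 0) = v + k from fun k => by omega]

theorem pvDbl_eq_zip (l : List Char) :
    ∀ a : Char, ((a :: l).zip l).any (fun p => p.1 == p.2) = pvDbl (some a) l := by
  induction l with
  | nil => intro a; simp [pvDbl]
  | cons b rest ih =>
      intro a
      simp [pvDbl, ← ih b]

theorem pvAdj_iff_infix (x y : Char) (l : List Char) :
    pvAdj x y l = true ↔ [x, y] <:+: l := by
  induction l with
  | nil => simp [pvAdj]
  | cons a rest ih =>
      cases rest with
      | nil =>
          simp [pvAdj, List.infix_cons_iff, List.cons_prefix_cons]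
      | cons b rest2 =>
          rw [List.infix_cons_iff, ← ih]
          simp only [pvAdj, Bool.or_eq_true, Bool.and_eq_true, beq_iff_eq,
            List.cons_prefix_cons, List.nil_prefix, and_true]
          constructor
          · rintro (⟨h1, h2⟩ | h)
            · exact Or.inl ⟨h1.symm, h2.symm⟩
            · exact Or.inr h
          · rintro (⟨h1, h2⟩ | h)
            · exact Or.inl ⟨h1.symm, h2.symm⟩
            · exact Or.inr h

theorem pvForb_eq_adj (l : List Char) :
    pvForb l = (pvAdj 'a' 'b' l || pvAdj 'c' 'd' l || pvAdj 'p' 'q' l || pvAdj 'x' 'y' l) := by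
  induction l with
  | nil => simp [pvForb, pvAdj]
  | cons a rest ih =>
      cases rest with
      | nil => simp [pvForb, pvAdj]
      | cons b rest2 =>
          simp only [pvForb, pvAdj, ih, pvForbiddenPair]
          cases pvAdj 'a' 'b' (b :: rest2) <;> cases pvAdj 'c' 'd' (b :: rest2) <;>
            cases pvAdj 'p' 'q' (b :: rest2) <;> cases pvAdj 'x' 'y' (b :: rest2) <;>
            cases (a == 'a' && b == 'b') <;> cases (a == 'c' && b == 'd') <;>
            cases (a == 'p' && b == 'q') <;> cases (a == 'x' && b == 'y') <;> rfl

theorem pvIsIn_eq_adj (x y : Char) (l : List Char) :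
    PySem.Chars.isIn [x, y] l = pvAdj x y l := by
  cases h : pvAdj x y l
  · rw [PySem.Chars.isIn_eq_false_iff]
    rw [← pvAdj_iff_infix, h]
    simp
  · exact (PySem.Chars.isIn_iff_infix [x, y] l).mpr ((pvAdj_iff_infix x y l).mp h)

theorem pvSum_eq_countP (l : List Char) :
    (l.map (fun c => if ("aeiou".toList.contains c) then (1 : Int) else 0)).sum
      = (l.countP (fun c => "aeiou".toList.contains c) : Int) := by
  induction l with
  | nil => simp
  | cons c rest ih =>
      rw [List.map_cons, List.sum_cons, ih, List.countP_cons]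
      by_cases h : ("aeiou".toList.contains c) = true
      · rw [if_pos h, if_pos h]; push_cast; ring
      · rw [if_neg h, if_neg h]; push_cast; ring

-- Rule 2 of A, rewritten to B's pvDbl (none case handled via head split).
theorem pvZip_eq_dbl (l : List Char) :
    (l.zip (PySem.List.slice l (some 1) none)).any (fun p => p.1 == p.2) = pvDbl none l := by
  rw [PySem.List.slice_from_one]
  cases l with
  | nil => simp [pvDbl]
  | cons a rest =>
      show ((a :: rest).zip rest).any (fun p => p.1 == p.2) = pvDbl none (a :: rest)
      rw [pvDbl_eq_zip]
      simp [pvDbl]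

-- ===== VERDICT (by name: the statement is the Claim_ definition above) =====
theorem is_nice_string_spec : Claim_equal_is_nice_string := by
  intro s _
  show is_nice_string s = is_nice_string_alt s
  unfold is_nice_string is_nice_string_alt
  rw [pvAltLoop_spec, pvZip_eq_dbl, pvSum_eq_countP, pvForb_eq_adj]
  have h1 : PySem.Str.isIn "ab" s = pvAdj 'a' 'b' s.toList := pvIsIn_eq_adj 'a' 'b' s.toList
  have h2 : PySem.Str.isIn "cd" s = pvAdj 'c' 'd' s.toList := pvIsIn_eq_adj 'c' 'd' s.toList
  have h3 : PySem.Str.isIn "pq" s = pvAdj 'p' 'q' s.toList := pvIsIn_eq_adj 'p' 'q' s.toList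
  have h4 : PySem.Str.isIn "xy" s = pvAdj 'x' 'y' s.toList := pvIsIn_eq_adj 'x' 'y' s.toList
  simp only [List.all_cons, List.all_nil, h1, h2, h3, h4, Nat.zero_add]
  have hcast : (3 ≤ ((s.toList.countP (fun c => "aeiou".toList.contains c)) : Int))
      ↔ 3 ≤ s.toList.countP (fun c => "aeiou".toList.contains c) := by
    constructor <;> (intro h; omega)
  simp only [decide_eq_decide.mpr hcast]
  cases decide (3 ≤ s.toList.countP (fun c => "aeiou".toList.contains c)) <;>
    cases pvDbl none s.toList <;>
    cases pvAdj 'a' 'b' s.toList <;> cases pvAdj 'c' 'd' s.toList <;>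
    cases pvAdj 'p' 'q' s.toList <;> cases pvAdj 'x' 'y' s.toList <;> rfl
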